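-- pv_equiv track=rewrite | github.com/Pratipkhandelwal/Python | avid.py | calc
-- ===== SOURCE A (Python) =====
-- def calc(qnum):
--     x=0
--     sum=0
--     while qnum:
--         y=qnum%10
--         qnum=int(qnum/10)
--         sum+=y *(4 ** x )
--         x+=1
--     return sum
-- ===== SOURCE B (Python) =====
-- def calc(qnum):
--     # Horner-form recursion of the same digit recurrence; int(qnum/10)
--     # (truncation toward zero) and Python's % kept exactly as in the task.
--     if not qnum:
--         return 0
--     return qnum % 10 + 4 * calc(int(qnum / 10))
-- ===== Notes on version B (the rewrite author's own statement) =====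
-- stated objective: alternative
-- what changed: Replaces the iterative while-loop that accumulates digit*4**x with an explicit power counter by a direct Horner-form recursion calc(q) = q%10 + 4*calc(int(q/10)), eliminating the x and sum accumulators.
import Mathlib
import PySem

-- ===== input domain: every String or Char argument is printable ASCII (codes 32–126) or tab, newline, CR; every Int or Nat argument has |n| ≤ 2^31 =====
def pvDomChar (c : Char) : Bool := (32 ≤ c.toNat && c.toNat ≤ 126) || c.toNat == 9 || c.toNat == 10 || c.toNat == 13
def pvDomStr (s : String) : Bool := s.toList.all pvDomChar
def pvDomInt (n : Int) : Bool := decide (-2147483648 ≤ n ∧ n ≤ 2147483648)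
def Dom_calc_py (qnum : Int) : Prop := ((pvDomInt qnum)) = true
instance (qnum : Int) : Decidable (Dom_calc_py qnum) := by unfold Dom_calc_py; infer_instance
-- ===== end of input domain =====

-- B replaces A's while-loop (power counter x and accumulator sum) by a direct
-- Horner-form recursion calc(q) = q%10 + 4*calc(int(q/10)); same cost, no accumulators.
-- Note: Python's `int(qnum/10)` truncates the float quotient toward zero; on |qnum| ≤ 2^31
-- the double division is accurate enough that this equals Int.tdiv (truncated division),
-- which is what both ports use. `qnum % 10` is Python's mod → PySem.Int.mod.

-- ===== PORT A =====
-- the while-loop of A, state (qnum, x, sum) exactly as in the Python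
def pvCalcLoop (qnum x sum : Int) : Int :=
  if h : qnum = 0 then sum
  else pvCalcLoop (qnum.tdiv 10) (x + 1) (sum + PySem.Int.mod qnum 10 * 4 ^ x.toNat)
termination_by qnum.natAbs
decreasing_by
  rw [Int.natAbs_tdiv]
  exact Nat.div_lt_self (Int.natAbs_pos.mpr h) (by norm_num)

def calc_py (qnum : Int) : Int := pvCalcLoop qnum 0 0

-- ===== PORT B =====
def calc_py_alt (qnum : Int) : Int :=
  if h : qnum = 0 then 0
  else PySem.Int.mod qnum 10 + 4 * calc_py_alt (qnum.tdiv 10)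
termination_by qnum.natAbs
decreasing_by
  rw [Int.natAbs_tdiv]
  exact Nat.div_lt_self (Int.natAbs_pos.mpr h) (by norm_num)

-- ===== PRECONDITION & SPEC =====
def Spec_calc_py (qnum : Int) (out : Int) : Prop := out = calc_py_alt qnum
instance (qnum : Int) (out : Int) : Decidable (Spec_calc_py qnum out) := by unfold Spec_calc_py; infer_instance

-- ===== CLAIM (what is proved, stated in full; the proofs are below) =====
def Claim_equal_calc_py : Prop := ∀ (qnum : Int), Dom_calc_py qnum → Spec_calc_py qnum (calc_py qnum)

-- ===== LEMMAS AND PROOFS =====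
-- loop invariant: the loop adds 4^x times the Horner value of the remaining digits
theorem pvCalcLoop_eq (n : Nat) (q x s : Int) (hn : q.natAbs = n) (hx : 0 ≤ x) :
    pvCalcLoop q x s = s + 4 ^ x.toNat * calc_py_alt q := by
  induction n using Nat.strong_induction_on generalizing q x s with
  | _ n ih =>
    rw [pvCalcLoop, calc_py_alt]
    by_cases h : q = 0
    · simp [h]
    · simp only [dif_neg h]
      have hlt : (q.tdiv 10).natAbs < n := by
        subst hn
        rw [Int.natAbs_tdiv]
        exact Nat.div_lt_self (Int.natAbs_pos.mpr h) (by norm_num)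
      rw [ih _ hlt _ (x + 1) _ rfl (by omega)]
      have ht : (x + 1).toNat = x.toNat + 1 := by omega
      rw [ht]
      ring

-- ===== VERDICT (by name: the statement is the Claim_ definition above) =====
theorem calc_py_spec : Claim_equal_calc_py := by
  intro qnum _
  unfold Spec_calc_py calc_py
  rw [pvCalcLoop_eq qnum.natAbs qnum 0 0 rfl le_rfl]
  simp
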